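-- pv_equiv track=rewrite | github.com/SAG-RH/RH-Main | CriptografiaSegundo.py | converter_em_numeros
-- ===== SOURCE A (Python) =====
-- def converter_em_numeros(palavra):
--     """receber como input a palavra que quer codificar e o retorno será uma conversão de letras em números"""
--     palavra_verificada = []
--     linha1 = []
--     linha2 = []
--     tabela_conversão = {"a": 1, "b": 2, "c": 3, "d": 4, "e": 5, "f": 6, "g": 7, "h": 8, "i": 9, "j": 10, "k": 11,
--                         "l": 12, "m": 13, "n": 14, "o": 15, "p": 16, "q": 17, "r": 18, "s": 19, "t": 20, "u": 21,
--                         "v": 22, "w": 23, "x": 24, "y": 25, "z": 0}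
--
--     for cada_latra in palavra:
--         if cada_latra != " ":
--             palavra_verificada.append(tabela_conversão[cada_latra])
--
--     if len(palavra_verificada) % 2 != 0:
--         palavra_verificada.append(0)
--
--     i = 0
--     k = 0
--     while i < len(palavra_verificada) / 2:
--         j = 0
--         while j < 2:
--             if (j == 0):
--                 linha1.append(palavra_verificada[k])
--             if (j == 1):
--                 linha2.append(palavra_verificada[k])
--             j = j + 1
--             k = k + 1
--         i = i + 1
--
--     return [linha1, linha2]
-- ===== SOURCE B (Python) =====
-- def converter_em_numeros(palavra):
--     """receber como input a palavra que quer codificar e o retorno sera uma conversao de letras em numeros"""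
--     tabela_conversao = {"a": 1, "b": 2, "c": 3, "d": 4, "e": 5, "f": 6, "g": 7, "h": 8, "i": 9, "j": 10, "k": 11,
--                         "l": 12, "m": 13, "n": 14, "o": 15, "p": 16, "q": 17, "r": 18, "s": 19, "t": 20, "u": 21,
--                         "v": 22, "w": 23, "x": 24, "y": 25, "z": 0}
--     palavra_verificada = [tabela_conversao[c] for c in palavra if c != " "]
--     if len(palavra_verificada) % 2 != 0:
--         palavra_verificada.append(0)
--     return [palavra_verificada[0::2], palavra_verificada[1::2]]
-- ===== Notes on version B (the rewrite author's own statement) =====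
-- stated objective: simpler
-- what changed: Replaces the nested while loop with i/j/k counters that interleaves elements into the two rows by a comprehension plus two strided slices pv[0::2]/pv[1::2].
import Mathlib
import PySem

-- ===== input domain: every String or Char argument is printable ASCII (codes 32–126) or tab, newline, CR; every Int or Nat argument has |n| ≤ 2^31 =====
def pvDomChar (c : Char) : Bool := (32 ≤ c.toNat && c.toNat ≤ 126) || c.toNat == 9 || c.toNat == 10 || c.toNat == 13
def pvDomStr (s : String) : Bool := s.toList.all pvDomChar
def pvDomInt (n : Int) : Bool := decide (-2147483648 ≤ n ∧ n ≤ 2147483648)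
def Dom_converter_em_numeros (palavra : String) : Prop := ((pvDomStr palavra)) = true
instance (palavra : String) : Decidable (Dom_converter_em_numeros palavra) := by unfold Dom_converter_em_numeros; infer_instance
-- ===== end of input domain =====

-- B replaces A's interleaving nested while loop (i/j/k counters) with a comprehension plus two strided slices pv[0::2]/pv[1::2]: a simpler decomposition, same cost.


-- ===== PORT A =====
-- tabela_conversão (the identical dict literal appears in both Pythons; shared here as data)
def pvTabela : PySem.Dict Char Int :=
  ⟨[('a',1),('b',2),('c',3),('d',4),('e',5),('f',6),('g',7),('h',8),('i',9),('j',10),('k',11),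
    ('l',12),('m',13),('n',14),('o',15),('p',16),('q',17),('r',18),('s',19),('t',20),('u',21),
    ('v',22),('w',23),('x',24),('y',25),('z',0)]⟩

-- tabela_conversão[c]; `none` = KeyError, excluded by Pre_ (the default 0 is never reached inside Pre_)
def pvLookup (c : Char) : Int := (PySem.Dict.get? pvTabela c).getD 0

-- the nested while loop: one outer iteration (i) runs j = 0,1 appending pv[k] to linha1 and pv[k+1] to linha2
def pvLoopA (pv : List Int) (i k : Nat) (l1 l2 : List Int) : List Int × List Int :=
  if _h : i < pv.length / 2 then
    pvLoopA pv (i+1) (k+2) (l1 ++ [pv.getD k 0]) (l2 ++ [pv.getD (k+1) 0])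
  else (l1, l2)
termination_by pv.length / 2 - i

-- palavra_verificada, after the for loop
def pvVerifA (palavra : String) : List Int :=
  palavra.toList.foldl (fun acc c => if c != ' ' then acc ++ [pvLookup c] else acc) []

-- palavra_verificada after the parity padding
def pvPadA (palavra : String) : List Int :=
  if (pvVerifA palavra).length % 2 ≠ 0 then pvVerifA palavra ++ [0] else pvVerifA palavra

def converter_em_numeros (palavra : String) : List (List Int) :=
  [(pvLoopA (pvPadA palavra) 0 0 [] []).1, (pvLoopA (pvPadA palavra) 0 0 [] []).2]

-- ===== PORT B =====
-- the list comprehension [tabela[c] for c in palavra if c != " "]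
def pvVerifB (palavra : String) : List Int :=
  (palavra.toList.filter (fun c => c != ' ')).map pvLookup

-- palavra_verificada after the parity padding
def pvPadB (palavra : String) : List Int :=
  if (pvVerifB palavra).length % 2 ≠ 0 then pvVerifB palavra ++ [0] else pvVerifB palavra

def converter_em_numeros_alt (palavra : String) : List (List Int) :=
  [(PySem.List.slice? (pvPadB palavra) (some 0) none 2).getD [],
   (PySem.List.slice? (pvPadB palavra) (some 1) none 2).getD []]

-- ===== PRECONDITION & SPEC =====
-- Pre_ excludes exactly the inputs where the dict lookup raises KeyError (any character other than
-- a lowercase ASCII letter or a space); both A and B raise there.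
def Pre_converter_em_numeros (palavra : String) : Prop :=
  (palavra.toList.all (fun c => c == ' ' || ('a' ≤ c && c ≤ 'z'))) = true
instance (palavra : String) : Decidable (Pre_converter_em_numeros palavra) := by
  unfold Pre_converter_em_numeros; infer_instance

def pvWitness_converter_em_numeros : String := "ola mundo"

def Spec_converter_em_numeros (palavra : String) (out : List (List Int)) : Prop := out = converter_em_numeros_alt palavra
instance (palavra : String) (out : List (List Int)) : Decidable (Spec_converter_em_numeros palavra out) := by unfold Spec_converter_em_numeros; infer_instance

-- ===== CLAIM (what is proved, stated in full; the proofs are below) =====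
def Claim_equal_converter_em_numeros : Prop := ∀ (palavra : String), Dom_converter_em_numeros palavra → Pre_converter_em_numeros palavra → Spec_converter_em_numeros palavra (converter_em_numeros palavra)

-- ===== LEMMAS AND PROOFS =====

-- the elements of xs at even positions / at odd positions
def pvEvens : List Int → List Int
  | [] => []
  | [x] => [x]
  | x :: _ :: r => x :: pvEvens r

def pvOdds : List Int → List Int
  | [] => []
  | [_] => []
  | _ :: y :: r => y :: pvOdds r

lemma pvEvens_eq (xs : List Int) :
    pvEvens xs = List.filterMap (fun k => xs[2*k]?) (List.range ((xs.length+1)/2)) := by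
  induction xs using pvEvens.induct with
  | case1 => simp [pvEvens]
  | case2 x => simp [pvEvens]
  | case3 x y r ih =>
      have hlen : ((x :: y :: r).length + 1) / 2 = (r.length + 1) / 2 + 1 := by simp; omega
      rw [pvEvens, hlen, List.range_succ_eq_map]
      simp [ih, List.filterMap_map, Nat.mul_add]

lemma pvOdds_eq (xs : List Int) :
    pvOdds xs = List.filterMap (fun k => xs[2*k+1]?) (List.range (xs.length/2)) := by
  induction xs using pvOdds.induct with
  | case1 => simp [pvOdds]
  | case2 x => simp [pvOdds]
  | case3 x y r ih =>
      have hlen : (x :: y :: r).length / 2 = r.length / 2 + 1 := by simp; omega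
      rw [pvOdds, hlen, List.range_succ_eq_map]
      simp [ih, List.filterMap_map, Nat.mul_add]

lemma slice_evens (xs : List Int) :
    PySem.List.slice? xs (some 0) none 2 = some (pvEvens xs) := by
  rw [pvEvens_eq]
  simp only [PySem.List.slice?, PySem.List.sliceIndices]
  norm_num
  have hc : (if 0 < xs.length then (((xs.length : Int) + 2 - 1) / 2).toNat else 0) = (xs.length + 1) / 2 := by
    split_ifs with h <;> omega
  have hf : (fun x : Nat => xs[(2 * (x:Int)).toNat]?) = fun k : Nat => xs[2*k]? := by
    funext k; congr 1
  rw [hf, hc]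

lemma slice_odds (xs : List Int) :
    PySem.List.slice? xs (some 1) none 2 = some (pvOdds xs) := by
  rw [pvOdds_eq]
  simp only [PySem.List.slice?, PySem.List.sliceIndices]
  norm_num
  rcases Nat.eq_zero_or_pos xs.length with h0 | hpos
  · simp [h0]
  · have hmin : min 1 (xs.length : Int) = 1 := by omega
    rw [hmin]
    have hc : (if 1 < xs.length then (((xs.length : Int) - 1 + 2 - 1) / 2).toNat else 0) = xs.length / 2 := by
      split_ifs with h <;> omega
    rw [hc]
    have hf : (fun x : Nat => xs[(1 + 2*(x:Int)).toNat]?) = fun k => xs[2*k+1]? := by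
      funext k; congr 1; omega
    rw [hf]

lemma loopA_spec (pv : List Int) (hp : pv.length % 2 = 0) :
    ∀ rest i l1 l2, rest = pv.drop (2*i) →
      pvLoopA pv i (2*i) l1 l2 = (l1 ++ pvEvens rest, l2 ++ pvOdds rest) := by
  intro rest
  induction rest using pvEvens.induct with
  | case1 =>
      intro i l1 l2 hr
      have hle : pv.length ≤ 2*i := List.drop_eq_nil_iff.mp hr.symm
      rw [pvLoopA, dif_neg (by omega)]
      simp [pvEvens, pvOdds]
  | case2 x =>
      intro i l1 l2 hr
      have h1 : (pv.drop (2*i)).length = 1 := by rw [← hr]; simp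
      rw [List.length_drop] at h1
      omega
  | case3 x y r ih =>
      intro i l1 l2 hr
      have hlen : (pv.drop (2*i)).length = r.length + 2 := by rw [← hr]; simp
      rw [List.length_drop] at hlen
      have hx : pv[2*i]? = some x := by
        have h0 : (pv.drop (2*i))[0]? = some x := by rw [← hr]; rfl
        simpa [List.getElem?_drop] using h0
      have hy : pv[2*i+1]? = some y := by
        have h0 : (pv.drop (2*i))[1]? = some y := by rw [← hr]; rfl
        simpa [List.getElem?_drop] using h0
      have hdrop : pv.drop (2*(i+1)) = r := by
        have h2 : pv.drop (2*(i+1)) = (pv.drop (2*i)).drop 2 := by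
          rw [List.drop_drop]; ring_nf
        rw [h2, ← hr]; simp
      rw [pvLoopA, dif_pos (by omega)]
      have h1 : pv.getD (2*i) 0 = x := by simp [List.getD_eq_getElem?_getD, hx]
      have h2 : pv.getD (2*i+1) 0 = y := by simp [List.getD_eq_getElem?_getD, hy]
      rw [h1, h2]
      have h3 := ih (i+1) (l1 ++ [x]) (l2 ++ [y]) hdrop.symm
      rw [show 2*(i+1) = 2*i+2 by ring] at h3
      rw [h3]
      simp [pvEvens, pvOdds]

lemma main_aux (pv : List Int) (hp : pv.length % 2 = 0) :
    [(pvLoopA pv 0 0 [] []).1, (pvLoopA pv 0 0 [] []).2] =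
      [(PySem.List.slice? pv (some 0) none 2).getD [],
       (PySem.List.slice? pv (some 1) none 2).getD []] := by
  have h := loopA_spec pv hp pv 0 [] [] (by simp)
  simp only [Nat.mul_zero] at h
  rw [h, slice_evens, slice_odds]
  simp

-- ===== VERDICT (by name: the statement is the Claim_ definition above) =====
theorem converter_em_numeros_spec : Claim_equal_converter_em_numeros := by
  intro palavra _ _
  show converter_em_numeros palavra = converter_em_numeros_alt palavra
  have h1 : pvVerifA palavra = pvVerifB palavra := by
    unfold pvVerifA pvVerifB
    have hfold := PySem.List.foldl_append_if (fun c => c != ' ') pvLookup palavra.toList ([] : List Int)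
    rw [List.nil_append] at hfold
    exact hfold
  have h2 : pvPadA palavra = pvPadB palavra := by unfold pvPadA pvPadB; rw [h1]
  have hp : (pvPadB palavra).length % 2 = 0 := by
    unfold pvPadB; split_ifs with h <;> simp at h ⊢ <;> omega
  unfold converter_em_numeros converter_em_numeros_alt
  rw [h2]
  exact main_aux _ hp
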